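-- pv_equiv track=rewrite | github.com/itsecd/isb-2026 | lab_2/tests.py | _find_max_run_in_block
-- ===== SOURCE A (Python) =====
-- from typing import List, Tuple
--
-- def _find_max_run_in_block(block: List[int]) -> int:
--     """
--     Находит максимальную длину последовательности единиц в блоке.
--
--     Args:
--         block: Блок битов
--
--     Returns:
--         Максимальная длина последовательности единиц
--     """
--     max_run = 0
--     current = 0
--
--     for bit in block:
--         if bit == 1:
--             current += 1
--             max_run = max(max_run, current)
--         else:
--             current = 0
--
--     return max_run
-- ===== SOURCE B (Python) =====
-- def _find_max_run_in_block(block):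
--     # two-pointer scan: jump over each maximal run of ones in one inner sweep
--     best = 0
--     i, n = 0, len(block)
--     while i < n:
--         if block[i] != 1:
--             i += 1
--             continue
--         j = i + 1
--         while j < n and block[j] == 1:
--             j += 1
--         if j - i > best:
--             best = j - i
--         i = j
--     return best
-- ===== Notes on version B (the rewrite author's own statement) =====
-- stated objective: alternative
-- what changed: Replaces the running-counter-with-reset fold by a two-pointer scan that measures each maximal run of ones with an inner sweep and jumps past it, keeping only the best length.
import Mathlib
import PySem

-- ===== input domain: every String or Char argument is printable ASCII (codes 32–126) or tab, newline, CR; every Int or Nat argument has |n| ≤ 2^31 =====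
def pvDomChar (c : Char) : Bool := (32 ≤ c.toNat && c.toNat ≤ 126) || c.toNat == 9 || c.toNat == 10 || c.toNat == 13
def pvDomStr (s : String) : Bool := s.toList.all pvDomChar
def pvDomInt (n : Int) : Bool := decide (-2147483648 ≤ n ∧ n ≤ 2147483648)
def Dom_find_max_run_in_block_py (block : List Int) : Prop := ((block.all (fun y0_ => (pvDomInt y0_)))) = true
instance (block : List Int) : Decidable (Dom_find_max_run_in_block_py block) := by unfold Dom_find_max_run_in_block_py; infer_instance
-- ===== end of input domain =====

-- B replaces A's running-counter-with-reset loop by a two-pointer run scan (same O(n) cost, different structure: objective "alternative").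
-- ===== PORT A =====
-- A: running counter of current ones, reset on non-1, max tracked; loop -> structural recursion over same state
def pvAGo (max_run current : Int) : List Int → Int
  | [] => max_run
  | bit :: rest =>
    if bit = 1 then pvAGo (max max_run (current + 1)) (current + 1) rest
    else pvAGo max_run 0 rest

def find_max_run_in_block_py (block : List Int) : Int := pvAGo 0 0 block

-- ===== PORT B =====
-- B: two-pointer scan; the inner while (count the run of ones) is pvLead, the outer loop jumps past it
def pvLead : List Int → Nat
  | [] => 0
  | x :: xs => if x = 1 then pvLead xs + 1 else 0

def pvBGo (best : Int) : List Int → Int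
  | [] => best
  | x :: xs =>
    if x = 1 then pvBGo (max best ((pvLead xs : Int) + 1)) (xs.drop (pvLead xs))
    else pvBGo best xs
termination_by l => l.length
decreasing_by
  · simp [List.length_drop]
  · simp

def find_max_run_in_block_py_alt (block : List Int) : Int := pvBGo 0 block

-- ===== PRECONDITION & SPEC =====
def Spec_find_max_run_in_block_py (block : List Int) (out : Int) : Prop := out = find_max_run_in_block_py_alt block
instance (block : List Int) (out : Int) : Decidable (Spec_find_max_run_in_block_py block out) := by unfold Spec_find_max_run_in_block_py; infer_instance

-- ===== CLAIM (what is proved, stated in full; the proofs are below) =====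
def Claim_equal_find_max_run_in_block_py : Prop := ∀ (block : List Int), Dom_find_max_run_in_block_py block → Spec_find_max_run_in_block_py block (find_max_run_in_block_py block)

-- ===== LEMMAS AND PROOFS =====

-- ===== VERDICT (by name: the statement is the Claim_ definition above) =====
lemma pvLead_cons_one (xs : List Int) : pvLead (1 :: xs) = pvLead xs + 1 := by
  simp [pvLead]

-- one-step refolding of pvBGo into "skip the leading run" form
lemma pvBGo_unfold (m : Int) (l : List Int) (hm : 0 ≤ m) :
    pvBGo m l = pvBGo (max m (pvLead l : Int)) (l.drop (pvLead l)) := by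
  cases l with
  | nil => simp [pvBGo, pvLead]; omega
  | cons z zs =>
    by_cases hz : z = 1
    · subst hz
      rw [pvLead_cons_one]
      simp [pvBGo, List.drop_succ_cons]
    · have h0 : max m 0 = m := by omega
      simp [pvBGo, pvLead, hz, h0]

-- main invariant: A's state (max_run, current) vs B's "best plus pending run"
lemma pvKey (l : List Int) : ∀ (m c : Int), 0 ≤ c → c ≤ m →
    pvAGo m c l = pvBGo (max m (c + (pvLead l : Int))) (l.drop (pvLead l)) := by
  induction l with
  | nil => intro m c _ hcm; simp [pvAGo, pvBGo, pvLead]; omega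
  | cons y ys ih =>
    intro m c hc hcm
    by_cases hy : y = 1
    · subst hy
      rw [pvLead_cons_one]
      have h1 : (0:Int) ≤ c + 1 := by omega
      have h2 : c + 1 ≤ max m (c + 1) := le_max_right _ _
      have := ih (max m (c + 1)) (c + 1) h1 h2
      simp only [pvAGo, List.drop_succ_cons]
      rw [this]
      have hL : (0:Int) ≤ (pvLead ys : Int) := Int.natCast_nonneg _
      have : max (max m (c + 1)) (c + 1 + (pvLead ys : Int))
           = max m (c + ((pvLead ys : Int) + 1)) := by omega
      rw [this]
      push_cast
      simp
    · have hmc : max m c = m := by omega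
      simp only [pvAGo, pvLead, if_neg hy, Nat.cast_zero, add_zero, hmc, List.drop_zero]
      rw [ih m 0 le_rfl (by omega)]
      simp only [zero_add]
      rw [← pvBGo_unfold m ys (by omega)]
      simp [pvBGo, hy]

theorem find_max_run_in_block_py_spec : Claim_equal_find_max_run_in_block_py := by
  intro block _
  unfold Spec_find_max_run_in_block_py find_max_run_in_block_py find_max_run_in_block_py_alt
  rw [pvKey block 0 0 le_rfl le_rfl]
  rw [show (0:Int) + (pvLead block : Int) = (pvLead block : Int) by ring]
  rw [← pvBGo_unfold 0 block le_rfl]
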